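-- pv_equiv track=rewrite | github.com/cloudydev/Euler | p52.py | is_same_digits
-- ===== SOURCE A (Python) =====
-- def is_same_digits(a, b):
-- 	s = [0 for x in range(10)]
-- 	while a:
-- 		r = a % 10
-- 		t = b % 10
-- 		s[r] += 1
-- 		s[t] -= 1
-- 		a = a // 10
-- 		b = b // 10
-- 	return all(not x for x in s)
-- ===== SOURCE B (Python) =====
-- def is_same_digits(a, b):
--     da, db = [], []
--     while a:
--         da.append(a % 10)
--         db.append(b % 10)
--         a //= 10
--         b //= 10
--     return sorted(da) == sorted(db)
-- ===== Notes on version B (the rewrite author's own statement) =====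
-- stated objective: simpler
-- what changed: Replaces the signed length-10 count array and its all-zero scan with collecting the low-order digits of both numbers in the same lockstep loop and comparing the two digit multisets via sorted(da)==sorted(db).
import Mathlib
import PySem

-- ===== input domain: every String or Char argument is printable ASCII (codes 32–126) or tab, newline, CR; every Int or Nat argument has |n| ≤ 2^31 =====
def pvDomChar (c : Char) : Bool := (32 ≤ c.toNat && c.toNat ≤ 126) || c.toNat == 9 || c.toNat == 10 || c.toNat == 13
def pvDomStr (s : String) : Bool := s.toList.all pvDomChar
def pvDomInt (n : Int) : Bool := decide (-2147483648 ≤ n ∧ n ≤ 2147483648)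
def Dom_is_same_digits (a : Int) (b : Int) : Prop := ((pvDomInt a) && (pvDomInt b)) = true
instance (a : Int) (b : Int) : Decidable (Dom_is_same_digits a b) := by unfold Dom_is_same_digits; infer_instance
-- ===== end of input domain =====

-- B collects both numbers' low-order digits in the same lockstep `while a` loop and compares
-- sorted digit lists instead of maintaining A's signed length-10 count array (objective: simpler).
-- For a < 0 Python's while-loop never terminates in either version; both ports' fuel guard
-- returns immediately there and they still agree, so the equivalence is stated without a Pre_.


-- ===== PORT A =====
-- the while loop; fuel a.toNat bounds the number of iterations (for 0 ≤ a the loop runs at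
-- most a.toNat times, so the fuel guard is never hit inside Pre_)
def pvLoopA : Nat → Int → Int → List Int → List Int
  | 0, _, _, s => s
  | f+1, a, b, s =>
    if a ≠ 0 then
      let r := PySem.Int.mod a 10
      let t := PySem.Int.mod b 10
      -- r, t ∈ [0,10) (divisor 10 > 0), so `.toNat` is the exact Python index
      let s1 := s.set r.toNat (s.getD r.toNat 0 + 1)
      let s2 := s1.set t.toNat (s1.getD t.toNat 0 - 1)
      pvLoopA f (PySem.Int.floordiv a 10) (PySem.Int.floordiv b 10) s2
    else s

def is_same_digits (a : Int) (b : Int) : Bool :=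
  (pvLoopA a.toNat a b (List.replicate 10 0)).all (fun x => x == 0)

-- ===== PORT B =====
def pvLoopB : Nat → Int → Int → List Int → List Int → List Int × List Int
  | 0, _, _, da, db => (da, db)
  | f+1, a, b, da, db =>
    if a ≠ 0 then
      pvLoopB f (PySem.Int.floordiv a 10) (PySem.Int.floordiv b 10)
        (da ++ [PySem.Int.mod a 10]) (db ++ [PySem.Int.mod b 10])
    else (da, db)

def is_same_digits_alt (a : Int) (b : Int) : Bool :=
  let p := pvLoopB a.toNat a b [] []
  PySem.List.sorted p.1 (fun x => x) false == PySem.List.sorted p.2 (fun x => x) false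

-- ===== PRECONDITION & SPEC =====
def Spec_is_same_digits (a : Int) (b : Int) (out : Bool) : Prop := out = is_same_digits_alt a b
instance (a : Int) (b : Int) (out : Bool) : Decidable (Spec_is_same_digits a b out) := by unfold Spec_is_same_digits; infer_instance

-- ===== CLAIM (what is proved, stated in full; the proofs are below) =====
def Claim_equal_is_same_digits : Prop := ∀ (a : Int) (b : Int), Dom_is_same_digits a b → Spec_is_same_digits a b (is_same_digits a b)

-- ===== LEMMAS AND PROOFS =====

-- the B loop only appends to its accumulators
theorem pvLoopB_acc : ∀ (f : Nat) (a b : Int) (da db : List Int),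
    pvLoopB f a b da db = (da ++ (pvLoopB f a b [] []).1, db ++ (pvLoopB f a b [] []).2) := by
  intro f
  induction f with
  | zero => intro a b da db; simp [pvLoopB]
  | succ f ih =>
    intro a b da db
    by_cases h : a = 0
    · simp [pvLoopB, h]
    · simp only [pvLoopB, if_pos h, ne_eq]
      rw [ih _ _ (da ++ [PySem.Int.mod a 10]),
        ih (PySem.Int.floordiv a 10) (PySem.Int.floordiv b 10) ([] ++ [PySem.Int.mod a 10])]
      simp

-- every collected digit is in [0,10)
theorem pvLoopB_digits : ∀ (f : Nat) (a b : Int) (x : Int),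
    (x ∈ (pvLoopB f a b [] []).1 ∨ x ∈ (pvLoopB f a b [] []).2) → 0 ≤ x ∧ x < 10 := by
  intro f
  induction f with
  | zero => intro a b x hx; simp [pvLoopB] at hx
  | succ f ih =>
    intro a b x hx
    by_cases h : a = 0
    · simp [pvLoopB, h] at hx
    · simp only [pvLoopB, if_pos h, ne_eq] at hx
      rw [pvLoopB_acc] at hx
      simp only [List.nil_append, List.mem_append, List.mem_singleton] at hx
      rcases hx with (hx | hx) | (hx | hx)
      · subst hx
        exact ⟨PySem.Int.mod_nonneg _ (by norm_num), PySem.Int.mod_lt _ (by norm_num)⟩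
      · exact ih _ _ _ (Or.inl hx)
      · subst hx
        exact ⟨PySem.Int.mod_nonneg _ (by norm_num), PySem.Int.mod_lt _ (by norm_num)⟩
      · exact ih _ _ _ (Or.inr hx)

theorem getD_set_int (l : List Int) (i j : Nat) (x : Int) :
    (l.set i x).getD j 0 = if i = j ∧ i < l.length then x else l.getD j 0 := by
  simp only [List.getD_eq_getElem?_getD, List.getElem?_set]
  split_ifs with h1 h2 h3 <;> simp_all <;> omega

-- A's counter array tracks the difference of digit counts collected by B's loop
theorem pvLoopA_count : ∀ (f : Nat) (a b : Int) (s : List Int), s.length = 10 →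
    ∀ d : Nat, d < 10 →
    (pvLoopA f a b s).getD d 0
      = s.getD d 0 + ((pvLoopB f a b [] []).1.count (d : Int) : Int)
          - ((pvLoopB f a b [] []).2.count (d : Int) : Int) := by
  intro f
  induction f with
  | zero => intro a b s hlen d hd; simp [pvLoopA, pvLoopB]
  | succ f ih =>
    intro a b s hlen d hd
    by_cases h : a = 0
    · simp [pvLoopA, pvLoopB, h]
    · have hr0 := PySem.Int.mod_nonneg a (show (0:Int) < 10 by norm_num)
      have hr10 := PySem.Int.mod_lt a (show (0:Int) < 10 by norm_num)
      have ht0 := PySem.Int.mod_nonneg b (show (0:Int) < 10 by norm_num)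
      have ht10 := PySem.Int.mod_lt b (show (0:Int) < 10 by norm_num)
      simp only [pvLoopA, pvLoopB, if_pos h, ne_eq, List.nil_append]
      rw [ih _ _ _ (by simp [hlen]) d hd]
      rw [pvLoopB_acc f (PySem.Int.floordiv a 10) (PySem.Int.floordiv b 10)
        [PySem.Int.mod a 10] [PySem.Int.mod b 10]]
      simp only [List.count_append, List.count_cons, List.count_nil]
      rw [getD_set_int, getD_set_int, getD_set_int]
      simp only [List.length_set, hlen]
      split_ifs <;> simp_all <;> omega

theorem pvLoopA_length : ∀ (f : Nat) (a b : Int) (s : List Int),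
    (pvLoopA f a b s).length = s.length := by
  intro f
  induction f with
  | zero => intro a b s; simp [pvLoopA]
  | succ f ih =>
    intro a b s
    by_cases h : a = 0
    · simp [pvLoopA, h]
    · simp only [pvLoopA, if_pos h, ne_eq]
      rw [ih]
      simp

-- the all-zero test on A's final array says exactly that B's two digit lists are permutations
theorem final_iff (a b : Int) :
    ((pvLoopA a.toNat a b (List.replicate 10 0)).all (fun x => x == 0)) = true ↔
      (pvLoopB a.toNat a b [] []).1.Perm (pvLoopB a.toNat a b [] []).2 := by
  have hlenA : (pvLoopA a.toNat a b (List.replicate 10 0)).length = 10 := by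
    rw [pvLoopA_length]; simp
  have hcnt : ∀ d : Nat, d < 10 →
      (pvLoopA a.toNat a b (List.replicate 10 0)).getD d 0
        = ((pvLoopB a.toNat a b [] []).1.count (d : Int) : Int)
          - ((pvLoopB a.toNat a b [] []).2.count (d : Int) : Int) := by
    intro d hd
    rw [pvLoopA_count a.toNat a b _ (by simp) d hd]
    have h0 : (List.replicate 10 (0:Int)).getD d 0 = 0 := by
      rw [List.getD_eq_getElem _ _ (by simpa using hd)]
      exact List.getElem_replicate ..
    rw [h0]; ring
  rw [List.all_eq_true]
  constructor
  · intro hz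
    rw [List.perm_iff_count]
    intro n
    by_cases hn : 0 ≤ n ∧ n < 10
    · have hd : n.toNat < 10 := by omega
      have := hcnt n.toNat hd
      rw [Int.toNat_of_nonneg hn.1] at this
      have hmem : (pvLoopA a.toNat a b (List.replicate 10 0)).getD n.toNat 0
          ∈ pvLoopA a.toNat a b (List.replicate 10 0) := by
        rw [List.getD_eq_getElem _ _ (by omega)]
        exact List.getElem_mem _
      have h0 : (pvLoopA a.toNat a b (List.replicate 10 0)).getD n.toNat 0 = 0 := by
        simpa using hz _ hmem
      omega
    · have h1 : n ∉ (pvLoopB a.toNat a b [] []).1 := fun hmem => by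
        have := pvLoopB_digits a.toNat a b n (Or.inl hmem); omega
      have h2 : n ∉ (pvLoopB a.toNat a b [] []).2 := fun hmem => by
        have := pvLoopB_digits a.toNat a b n (Or.inr hmem); omega
      rw [List.count_eq_zero_of_not_mem h1, List.count_eq_zero_of_not_mem h2]
  · intro hperm x hx
    rw [List.perm_iff_count] at hperm
    rcases List.mem_iff_getElem.mp hx with ⟨d, hdlt, hdx⟩
    have hd : d < 10 := by omega
    have := hcnt d hd
    rw [List.getD_eq_getElem _ _ (by omega), hdx, hperm] at this
    simp [this]

-- ===== VERDICT (by name: the statement is the Claim_ definition above) =====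
theorem is_same_digits_spec : Claim_equal_is_same_digits := by
  intro a b _
  unfold Spec_is_same_digits is_same_digits is_same_digits_alt
  rw [Bool.eq_iff_iff, final_iff, beq_iff_eq,
    PySem.List.sorted_id_eq_sorted_id_iff_perm]
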